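-- pv_equiv track=rewrite | github.com/GeoscienceAustralia/anuga_core | anuga/abstract_2d_finite_volumes/pmesh2domain.py | build_tagged_elements_dictionary
-- ===== SOURCE A (Python) =====
-- from builtins import range
--
-- def build_tagged_elements_dictionary(mesh_dict):
--     """Build the dictionary of element tags.
--
--     tagged_elements is a dictionary of element arrays,
--     keyed by tag: { (tag): [e1, e2, e3..] }
--     """
--
--     tri_atts = mesh_dict['triangle_tags']
--     tagged_elements = {}
--     if tri_atts is None:
--        tagged_elements[''] = list(range(len(mesh_dict['triangles'])))
--     else:
--         for tri_att_index in range(len(tri_atts)):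
--             tagged_elements.setdefault(tri_atts[tri_att_index],
--                                        []).append(tri_att_index)
--
--     return tagged_elements
-- ===== SOURCE B (Python) =====
-- def build_tagged_elements_dictionary(mesh_dict):
--     """Build the dictionary of element tags: {tag: [e1, e2, ...]}.
--
--     Alternative decomposition: instead of one hash-bucketing pass with
--     setdefault, collect the distinct tags (first-occurrence order) and then
--     gather each tag's indices with a separate enumerate scan.
--     """
--     tri_atts = mesh_dict['triangle_tags']
--     if tri_atts is None:
--         return {'': list(range(len(mesh_dict['triangles'])))}
--     tags = list(dict.fromkeys(tri_atts))
--     return {tag: [i for i, t in enumerate(tri_atts) if t == tag] for tag in tags}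
-- ===== Notes on version B (the rewrite author's own statement) =====
-- stated objective: alternative
-- what changed: Replaces the single-pass dict.setdefault bucketing loop with a two-phase strategy: dedup the tags in first-occurrence order (dict.fromkeys), then build each tag's index list by a separate enumerate-filter scan.
import Mathlib
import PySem

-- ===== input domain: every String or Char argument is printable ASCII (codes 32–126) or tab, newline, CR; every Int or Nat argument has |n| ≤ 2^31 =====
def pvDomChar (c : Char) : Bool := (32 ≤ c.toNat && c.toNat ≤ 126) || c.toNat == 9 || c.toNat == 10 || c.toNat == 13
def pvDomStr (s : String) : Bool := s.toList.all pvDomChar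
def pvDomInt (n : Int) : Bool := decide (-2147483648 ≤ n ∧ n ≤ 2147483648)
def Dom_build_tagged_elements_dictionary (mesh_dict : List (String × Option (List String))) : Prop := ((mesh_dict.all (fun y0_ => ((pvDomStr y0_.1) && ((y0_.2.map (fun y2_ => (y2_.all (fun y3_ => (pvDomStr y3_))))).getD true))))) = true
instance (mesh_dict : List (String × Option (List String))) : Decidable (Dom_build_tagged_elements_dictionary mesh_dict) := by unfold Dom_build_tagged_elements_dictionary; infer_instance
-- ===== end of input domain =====

-- B groups triangle indices by tag via dedup-then-scan instead of A's single setdefault pass;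
-- objective: alternative decomposition (same results, not claimed faster).

-- ===== PORT A =====
def build_tagged_elements_dictionary (mesh_dict : List (String × Option (List String))) : List (String × List Int) :=
  match mesh_dict.lookup "triangle_tags" with
  | none => []        -- KeyError: excluded by Pre_
  | some none =>
    match mesh_dict.lookup "triangles" with
    | some (some tris) =>
        ((PySem.Dict.empty : PySem.Dict String (List Int)).insert ""
          (PySem.List.pyRange 0 (tris.length : Int) 1)).items
    | _ => []          -- KeyError / len(None) TypeError: excluded by Pre_
  | some (some tri_atts) =>
    ((PySem.List.pyRange 0 (tri_atts.length : Int) 1).foldl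
      (fun d i => d.modify (PySem.List.pyGetD tri_atts i "") [] (fun l => l ++ [i]))
      (PySem.Dict.empty : PySem.Dict String (List Int))).items

-- ===== PORT B =====
def build_tagged_elements_dictionary_alt (mesh_dict : List (String × Option (List String))) : List (String × List Int) :=
  -- Option.elim encodes B's early-return structure (first arg = missing key / None, excluded by Pre_)
  (mesh_dict.lookup "triangle_tags").elim [] (fun tri_atts? =>
    tri_atts?.elim
      ((mesh_dict.lookup "triangles").elim [] (fun tris? =>
        tris?.elim [] (fun tris => [("", PySem.List.pyRange 0 (tris.length : Int) 1)])))
      (fun tri_atts =>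
        (PySem.List.dedup tri_atts).map (fun tag =>
          (tag, ((PySem.List.enumerate tri_atts).filter (fun p => p.2 == tag)).map (fun p => p.1)))))

-- ===== PRECONDITION & SPEC =====
-- Pre_ excludes exactly the inputs where the Python A raises: a dict without the
-- 'triangle_tags' key (KeyError), and, when triangle_tags is None, a dict where
-- 'triangles' is missing (KeyError) or None (len(None) TypeError).
def Pre_build_tagged_elements_dictionary (mesh_dict : List (String × Option (List String))) : Prop :=
  ((mesh_dict.lookup "triangle_tags").elim false (fun tri_atts? =>
    tri_atts?.elim
      ((mesh_dict.lookup "triangles").elim false (fun tris? => tris?.isSome))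
      (fun _ => true))) = true
instance (mesh_dict : List (String × Option (List String))) : Decidable (Pre_build_tagged_elements_dictionary mesh_dict) := by unfold Pre_build_tagged_elements_dictionary; infer_instance
def pvWitness_build_tagged_elements_dictionary : (List (String × Option (List String))) :=
  [("triangle_tags", some ["a", "b", "a"]), ("triangles", some ["t0", "t1", "t2"])]
def Spec_build_tagged_elements_dictionary (mesh_dict : List (String × Option (List String))) (out : List (String × List Int)) : Prop := out = build_tagged_elements_dictionary_alt mesh_dict
instance (mesh_dict : List (String × Option (List String))) (out : List (String × List Int)) : Decidable (Spec_build_tagged_elements_dictionary mesh_dict out) := by unfold Spec_build_tagged_elements_dictionary; infer_instance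

-- ===== CLAIM (what is proved, stated in full; the proofs are below) =====
def Claim_equal_build_tagged_elements_dictionary : Prop := ∀ (mesh_dict : List (String × Option (List String))), Dom_build_tagged_elements_dictionary mesh_dict → Pre_build_tagged_elements_dictionary mesh_dict → Spec_build_tagged_elements_dictionary mesh_dict (build_tagged_elements_dictionary mesh_dict)

-- ===== LEMMAS AND PROOFS =====

-- enumerate over a snoc appends the final indexed pair
theorem pv_enumerate_snoc {α : Type} (ys : List α) (t : α) (s : Int) :
    PySem.List.enumerate (ys ++ [t]) s = PySem.List.enumerate ys s ++ [((s + ys.length : Int), t)] := by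
  induction ys generalizing s with
  | nil => simp [PySem.List.enumerate_nil, PySem.List.enumerate_cons]
  | cons y ys ih =>
      simp [PySem.List.enumerate_cons, ih]
      ring_nf

-- A's index loop over range(len(xs)) is the fold over the swapped enumerate pairs
theorem pv_foldRange_eq (xs : List String) (d : PySem.Dict String (List Int)) :
    (PySem.List.pyRange 0 (xs.length : Int) 1).foldl
      (fun d i => d.modify (PySem.List.pyGetD xs i "") [] (fun l => l ++ [i])) d
    = ((PySem.List.enumerate xs).map Prod.swap).foldl
      (fun d p => d.modify p.1 [] (fun l => l ++ [p.2])) d := by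
  rw [List.foldl_map]
  induction xs using List.reverseRecOn generalizing d with
  | nil => simp [PySem.List.enumerate_nil, PySem.List.pyRange_one_eq_nil]
  | append_singleton ys t ih =>
      have hlen : ((ys ++ [t]).length : Int) = (ys.length : Int) + 1 := by
        simp
      rw [hlen, PySem.List.pyRange_one_succ_right (by positivity), List.foldl_append,
          pv_enumerate_snoc ys t 0, List.foldl_append]
      have hcong : (PySem.List.pyRange 0 (ys.length : Int) 1).foldl
          (fun d i => d.modify (PySem.List.pyGetD (ys ++ [t]) i "") [] (fun l => l ++ [i])) d
          = (PySem.List.pyRange 0 (ys.length : Int) 1).foldl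
          (fun d i => d.modify (PySem.List.pyGetD ys i "") [] (fun l => l ++ [i])) d := by
        apply PySem.List.foldl_congr_mem
        intro acc i hi
        rw [PySem.List.mem_pyRange_one] at hi
        rw [PySem.List.pyGetD_eq_getElem (ys ++ [t]) "" hi.1 (by simp; omega),
            PySem.List.pyGetD_eq_getElem ys "" hi.1 (by omega),
            List.getElem_append_left (by omega)]
      rw [hcong, ih]
      have hget : PySem.List.pyGetD (ys ++ [t]) (ys.length : Int) "" = t := by
        rw [PySem.List.pyGetD_eq_getElem (ys ++ [t]) "" (by positivity) (by simp)]
        simp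
      simp [hget]

-- a dict with Nodup keys is the map of getD over its keys
theorem pv_items_eq_keys_map {κ ν : Type} [BEq κ] [LawfulBEq κ]
    (d : PySem.Dict κ ν) (h : d.keys.Nodup) (d0 : ν) :
    d.items = d.keys.map (fun k => (k, d.getD k d0)) := by
  have hk : d.keys = d.items.map (fun p => p.1) := rfl
  rw [hk, List.map_map]
  have : ∀ p ∈ d.items, ((fun k => (k, d.getD k d0)) ∘ fun p => p.1) p = p := by
    intro p hp
    have := PySem.Dict.getD_of_mem_items d (k := p.1) (v := p.2) (by simpa using hp) h d0
    simp [this]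
  rw [List.map_congr_left this]
  simp

-- the tags branch: A's setdefault loop produces exactly B's dedup-then-scan table
theorem pv_tags_branch (xs : List String) :
    ((PySem.List.pyRange 0 (xs.length : Int) 1).foldl
      (fun d i => d.modify (PySem.List.pyGetD xs i "") [] (fun l => l ++ [i]))
      (PySem.Dict.empty : PySem.Dict String (List Int))).items
    = (PySem.List.dedup xs).map (fun tag =>
        (tag, ((PySem.List.enumerate xs).filter (fun p => p.2 == tag)).map (fun p => p.1))) := by
  rw [pv_foldRange_eq]
  set L := (PySem.List.enumerate xs).map Prod.swap with hL
  set E := L.foldl (fun d p => d.modify p.1 [] (fun l => l ++ [p.2]))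
    (PySem.Dict.empty : PySem.Dict String (List Int)) with hE
  have hnodup : E.keys.Nodup := by
    rw [hE]
    exact PySem.Dict.nodup_keys_foldl_modify_key L Prod.fst [] (fun _ p l => l ++ [p.2]) _
      PySem.Dict.nodup_keys_empty
  have hkeys : E.keys = PySem.List.dedup xs := by
    rw [hE, PySem.Dict.keys_foldl_modify_key L Prod.fst [] (fun _ p l => l ++ [p.2])]
    rw [PySem.List.dedup_eq_ofList]
    have : L.map Prod.fst = xs := by
      rw [hL, List.map_map]
      have : (Prod.fst ∘ Prod.swap : Int × String → String) = fun p => p.2 := rfl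
      rw [this, PySem.List.map_snd_enumerate]
    rw [this]
    rfl
  have hgetD : ∀ c, E.getD c [] =
      ((PySem.List.enumerate xs).filter (fun p => p.2 == c)).map (fun p => p.1) := by
    intro c
    rw [hE, PySem.Dict.getD_foldl_modify_append L PySem.Dict.empty c, hL]
    simp [List.filter_map, Function.comp_def]
  rw [pv_items_eq_keys_map E hnodup [], hkeys]
  exact List.map_congr_left (fun tag _ => by rw [hgetD tag])

-- ===== VERDICT (by name: the statement is the Claim_ definition above) =====
theorem build_tagged_elements_dictionary_spec : Claim_equal_build_tagged_elements_dictionary := by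
  intro mesh_dict _ _
  unfold Spec_build_tagged_elements_dictionary build_tagged_elements_dictionary build_tagged_elements_dictionary_alt
  cases h1 : mesh_dict.lookup "triangle_tags" with
  | none => rfl
  | some v =>
    cases v with
    | none =>
      cases h2 : mesh_dict.lookup "triangles" with
      | none => rfl
      | some w =>
        cases w with
        | none => rfl
        | some tris =>
          simp [PySem.Dict.items_insert_of_not_contains, PySem.Dict.contains_empty]
          rfl
    | some tri_atts => exact pv_tags_branch tri_atts
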